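-- pv_equiv track=rewrite | github.com/joetache4/project-euler | 346_StrongRepunits.py | solve
-- ===== SOURCE A (Python) =====
-- from itertools import count
--
-- def solve(N):
-- 	repunits = set([1])
-- 	for b in count(2):
-- 		n = 1 + b + b*b
-- 		p = 3
-- 		if n >= N:
-- 			break
-- 		while n < N:
-- 			repunits.add(n)
-- 			n += b**p
-- 			p += 1
-- 	return sum(repunits)
-- ===== SOURCE B (Python) =====
-- def solve(N):
--     # collect repunits by digit-count using the closed-form geometric sum
--     repunits = {1}
--     d = 3
--     while 2 ** d - 1 < N:
--         b = 2
--         v = (b ** d - 1) // (b - 1)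
--         while v < N:
--             repunits.add(v)
--             b += 1
--             v = (b ** d - 1) // (b - 1)
--         d += 1
--     return sum(repunits)
-- ===== Notes on version B (the rewrite author's own statement) =====
-- stated objective: alternative
-- what changed: B enumerates repunits by digit-count (outer loop over lengths d>=3, inner over bases, value from the closed-form geometric sum (b**d-1)//(b-1)) instead of A's per-base incremental accumulation n += b**p, with a different termination test (2**d-1 >= N).
import Mathlib
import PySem

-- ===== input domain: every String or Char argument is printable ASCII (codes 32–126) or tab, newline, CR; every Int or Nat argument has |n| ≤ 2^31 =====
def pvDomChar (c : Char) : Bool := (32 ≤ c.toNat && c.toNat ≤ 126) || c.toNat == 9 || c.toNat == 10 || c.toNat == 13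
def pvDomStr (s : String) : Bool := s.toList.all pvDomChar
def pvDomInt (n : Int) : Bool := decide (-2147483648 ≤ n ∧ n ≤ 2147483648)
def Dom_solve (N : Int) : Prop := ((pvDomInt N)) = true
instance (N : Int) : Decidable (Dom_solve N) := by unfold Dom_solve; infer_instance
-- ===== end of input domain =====

-- B replaces A's per-base incremental accumulation by an outer loop over digit-counts d ≥ 3
-- with the closed-form geometric sum (b^d-1)//(b-1); same cost, different decomposition.

-- `rep b d` = the d-digit base-b repunit 1 + b + … + b^(d-1); used by the proofs and by
-- the termination argument of the ports' loops.
def rep (b : Int) (d : Nat) : Int := ∑ i ∈ Finset.range d, b ^ i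

theorem one_le_pow_of_two_le {b : Int} (hb : 2 ≤ b) (p : Nat) : 1 ≤ b ^ p :=
  one_le_pow₀ (by omega)

theorem rep_mono_d {b : Int} (hb : 2 ≤ b) {d d' : Nat} (h : d ≤ d') : rep b d ≤ rep b d' := by
  induction d' with
  | zero =>
    have : d = 0 := by omega
    simp [this]
  | succ k ih =>
    rcases Nat.lt_or_ge d (k + 1) with hlt | hge
    · have h1 := ih (by omega)
      have h2 := one_le_pow_of_two_le hb k
      have h3 : rep b (k + 1) = rep b k + b ^ k := by simp [rep, Finset.sum_range_succ]
      omega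
    · have : d = k + 1 := by omega
      simp [this]

theorem rep_three (b : Int) : rep b 3 = 1 + b + b * b := by
  simp [rep, Finset.sum_range_succ]; ring

theorem le_rep {b : Int} (hb : 2 ≤ b) {d : Nat} (hd : 3 ≤ d) : b ≤ rep b d := by
  have h3 : rep b 3 ≤ rep b d := rep_mono_d hb hd
  have hbb : 0 ≤ b * b := mul_self_nonneg b
  rw [rep_three] at h3; omega

theorem rep_floordiv {b : Int} (hb : 2 ≤ b) (d : Nat) :
    PySem.Int.floordiv (b ^ d - 1) (b - 1) = rep b d := by
  have hgeom : rep b d * (b - 1) = b ^ d - 1 := geom_sum_mul b d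
  rw [PySem.Int.floordiv_eq_iff_of_pos (by omega)]
  constructor
  · omega
  · nlinarith [hgeom]

-- ===== PORT A =====
def solveInner (N b : Int) (hb : 2 ≤ b) (n : Int) (p : Nat) (s : PySem.Set Int) :
    PySem.Set Int :=
  if n < N then
    solveInner N b hb (n + b ^ p) (p + 1) (PySem.Set.add s n)
  else s
termination_by (N - n).toNat
decreasing_by
  have := one_le_pow_of_two_le hb p
  omega

def solveOuter (N b : Int) (hb : 2 ≤ b) (s : PySem.Set Int) : PySem.Set Int :=
  let n := 1 + b + b * b
  if n ≥ N then s
  else solveOuter N (b + 1) (by omega) (solveInner N b hb n 3 s)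
termination_by (N - b).toNat
decreasing_by
  have hbb : 0 ≤ b * b := mul_self_nonneg b
  omega

def solve (N : Int) : Int :=
  (solveOuter N 2 (by norm_num) (PySem.Set.ofList [1])).sum

-- ===== PORT B =====
def solveAltInner (N : Int) (d : Nat) (b : Int) (hb : 2 ≤ b) (hd : 3 ≤ d)
    (s : PySem.Set Int) : PySem.Set Int :=
  let v := PySem.Int.floordiv (b ^ d - 1) (b - 1)
  if v < N then
    solveAltInner N d (b + 1) (by omega) hd (PySem.Set.add s v)
  else s
termination_by (N - b).toNat
decreasing_by
  rename_i h
  rw [show v = rep b d from rep_floordiv hb d] at h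
  have := le_rep hb hd
  omega

def solveAltOuter (N : Int) (d : Nat) (hd : 3 ≤ d) (s : PySem.Set Int) : PySem.Set Int :=
  if (2 : Int) ^ d - 1 < N then
    solveAltOuter N (d + 1) (by omega) (solveAltInner N d 2 (by norm_num) hd s)
  else s
termination_by (N + 1 - 2 ^ d).toNat
decreasing_by
  have h1 : (2 : Int) ^ d < 2 ^ (d + 1) := by
    have := one_le_pow_of_two_le (le_refl (2 : Int)) d
    rw [pow_succ]; omega
  have _h0 : (1 : Int) ≤ 2 ^ d := one_le_pow_of_two_le (le_refl (2 : Int)) d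
  omega

def solve_alt (N : Int) : Int :=
  (solveAltOuter N 3 (by norm_num) (PySem.Set.ofList [1])).sum

-- ===== PRECONDITION & SPEC =====
def Spec_solve (N : Int) (out : Int) : Prop := out = solve_alt N
instance (N : Int) (out : Int) : Decidable (Spec_solve N out) := by unfold Spec_solve; infer_instance

-- ===== CLAIM (what is proved, stated in full; the proofs are below) =====
def Claim_equal_solve : Prop := ∀ (N : Int), Dom_solve N → Spec_solve N (solve N)

-- ===== LEMMAS AND PROOFS =====

theorem rep_succ (b : Int) (d : Nat) : rep b (d + 1) = rep b d + b ^ d := by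
  simp [rep, Finset.sum_range_succ]

theorem rep_mono_b {b b' : Int} (hb : 2 ≤ b) (h : b ≤ b') (d : Nat) : rep b d ≤ rep b' d := by
  apply Finset.sum_le_sum
  intro i _
  exact pow_le_pow_left₀ (by omega) h i

theorem mem_solveInner (N b : Int) (hb : 2 ≤ b) (n : Int) (p : Nat) (s : PySem.Set Int)
    (x : Int) (hn : n = rep b p) :
    x ∈ solveInner N b hb n p s ↔ x ∈ s ∨ ∃ q, p ≤ q ∧ rep b q < N ∧ x = rep b q := by
  fun_induction solveInner N b hb n p s with
  | case1 n p s hlt ih =>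
    rw [ih (by rw [hn, rep_succ])]
    rw [PySem.Set.mem_add]
    constructor
    · rintro ((hx | rfl) | ⟨q, hq, hqN, rfl⟩)
      · exact Or.inl hx
      · exact Or.inr ⟨p, le_refl p, by omega, hn⟩
      · exact Or.inr ⟨q, by omega, hqN, rfl⟩
    · rintro (hx | ⟨q, hq, hqN, rfl⟩)
      · exact Or.inl (Or.inl hx)
      · rcases Nat.eq_or_lt_of_le hq with rfl | hq'
        · exact Or.inl (Or.inr hn.symm)
        · exact Or.inr ⟨q, by omega, hqN, rfl⟩
  | case2 n p s hlt =>
    simp only [not_lt] at hlt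
    constructor
    · exact Or.inl
    · rintro (hx | ⟨q, hq, hqN, rfl⟩)
      · exact hx
      · exact absurd hqN (by have := rep_mono_d hb hq; omega)

theorem mem_solveOuter (N b : Int) (hb : 2 ≤ b) (s : PySem.Set Int) (x : Int) :
    x ∈ solveOuter N b hb s ↔
      x ∈ s ∨ ∃ b', b ≤ b' ∧ ∃ q, 3 ≤ q ∧ rep b' q < N ∧ x = rep b' q := by
  fun_induction solveOuter N b hb s with
  | case1 b hb s n hge =>
    simp only [n, ge_iff_le] at hge
    constructor
    · exact Or.inl
    · rintro (hx | ⟨b', hb', q, hq, hqN, rfl⟩)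
      · exact hx
      · exfalso
        have h1 : rep b 3 ≤ rep b' 3 := rep_mono_b hb hb' 3
        have h2 : rep b' 3 ≤ rep b' q := rep_mono_d (by omega) hq
        rw [rep_three] at h1
        omega
  | case2 b hb s n hge ih =>
    rw [ih, mem_solveInner N b hb n 3 s x (by rw [rep_three])]
    constructor
    · rintro ((hx | ⟨q, hq, hqN, rfl⟩) | ⟨b', hb', q, hq, hqN, rfl⟩)
      · exact Or.inl hx
      · exact Or.inr ⟨b, le_refl b, q, hq, hqN, rfl⟩
      · exact Or.inr ⟨b', by omega, q, hq, hqN, rfl⟩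
    · rintro (hx | ⟨b', hb', q, hq, hqN, rfl⟩)
      · exact Or.inl (Or.inl hx)
      · rcases Int.lt_or_le b b' with hlt | hle
        · exact Or.inr ⟨b', by omega, q, hq, hqN, rfl⟩
        · have : b' = b := by omega
          subst this
          exact Or.inl (Or.inr ⟨q, hq, hqN, rfl⟩)

theorem mem_solveAltInner (N : Int) (d : Nat) (b : Int) (hb : 2 ≤ b) (hd : 3 ≤ d)
    (s : PySem.Set Int) (x : Int) :
    x ∈ solveAltInner N d b hb hd s ↔
      x ∈ s ∨ ∃ b', b ≤ b' ∧ rep b' d < N ∧ x = rep b' d := by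
  fun_induction solveAltInner N d b hb hd s with
  | case1 b hb s v hlt ih =>
    have hv : v = rep b d := by simp only [v, rep_floordiv hb]
    rw [ih, PySem.Set.mem_add]
    constructor
    · rintro ((hx | rfl) | ⟨b', hb', hbN, rfl⟩)
      · exact Or.inl hx
      · exact Or.inr ⟨b, le_refl b, by omega, hv⟩
      · exact Or.inr ⟨b', by omega, hbN, rfl⟩
    · rintro (hx | ⟨b', hb', hbN, rfl⟩)
      · exact Or.inl (Or.inl hx)
      · rcases Int.lt_or_le b b' with h' | h'
        · exact Or.inr ⟨b', by omega, hbN, rfl⟩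
        · have : b' = b := by omega
          subst this
          exact Or.inl (Or.inr hv.symm)
  | case2 b hb s v hlt =>
    have hv : v = rep b d := by simp only [v, rep_floordiv hb]
    rw [hv] at hlt
    simp only [not_lt] at hlt
    constructor
    · exact Or.inl
    · rintro (hx | ⟨b', hb', hbN, rfl⟩)
      · exact hx
      · exact absurd hbN (by have := rep_mono_b hb hb' d; omega)

theorem rep_two (d : Nat) : rep 2 d = 2 ^ d - 1 := by
  have := geom_sum_mul (2 : Int) d
  rw [rep]; omega

theorem mem_solveAltOuter (N : Int) (d : Nat) (hd : 3 ≤ d) (s : PySem.Set Int) (x : Int) :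
    x ∈ solveAltOuter N d hd s ↔
      x ∈ s ∨ ∃ d', d ≤ d' ∧ ∃ b, 2 ≤ b ∧ rep b d' < N ∧ x = rep b d' := by
  fun_induction solveAltOuter N d hd s with
  | case1 d hd s hlt ih =>
    rw [ih, mem_solveAltInner]
    constructor
    · rintro ((hx | ⟨b', hb', hbN, rfl⟩) | ⟨d', hd', b, hb, hbN, rfl⟩)
      · exact Or.inl hx
      · exact Or.inr ⟨d, le_refl d, b', hb', hbN, rfl⟩
      · exact Or.inr ⟨d', by omega, b, hb, hbN, rfl⟩
    · rintro (hx | ⟨d', hd', b, hb, hbN, rfl⟩)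
      · exact Or.inl (Or.inl hx)
      · rcases Nat.eq_or_lt_of_le hd' with rfl | h'
        · exact Or.inl (Or.inr ⟨b, hb, hbN, rfl⟩)
        · exact Or.inr ⟨d', by omega, b, hb, hbN, rfl⟩
  | case2 d hd s hlt =>
    simp only [not_lt] at hlt
    constructor
    · exact Or.inl
    · rintro (hx | ⟨d', hd', b, hb, hbN, rfl⟩)
      · exact hx
      · exfalso
        have h1 : rep 2 d' ≤ rep b d' := rep_mono_b (le_refl 2) hb d'
        have h2 : rep 2 d ≤ rep 2 d' := rep_mono_d (le_refl 2) hd'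
        rw [rep_two] at h2
        omega

theorem nodup_solveInner (N b : Int) (hb : 2 ≤ b) (n : Int) (p : Nat) (s : PySem.Set Int)
    (hs : s.Nodup) : (solveInner N b hb n p s).Nodup := by
  fun_induction solveInner N b hb n p s with
  | case1 n p s hlt ih => exact ih (PySem.Set.nodup_add _ _ hs)
  | case2 n p s hlt => exact hs

theorem nodup_solveOuter (N b : Int) (hb : 2 ≤ b) (s : PySem.Set Int)
    (hs : s.Nodup) : (solveOuter N b hb s).Nodup := by
  fun_induction solveOuter N b hb s with
  | case1 b hb s n hge => exact hs
  | case2 b hb s n hge ih => exact ih (nodup_solveInner N b hb n 3 s hs)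

theorem nodup_solveAltInner (N : Int) (d : Nat) (b : Int) (hb : 2 ≤ b) (hd : 3 ≤ d)
    (s : PySem.Set Int) (hs : s.Nodup) : (solveAltInner N d b hb hd s).Nodup := by
  fun_induction solveAltInner N d b hb hd s with
  | case1 b hb s v hlt ih => exact ih (PySem.Set.nodup_add _ _ hs)
  | case2 b hb s v hlt => exact hs

theorem nodup_solveAltOuter (N : Int) (d : Nat) (hd : 3 ≤ d) (s : PySem.Set Int)
    (hs : s.Nodup) : (solveAltOuter N d hd s).Nodup := by
  fun_induction solveAltOuter N d hd s with
  | case1 d hd s hlt ih => exact ih (nodup_solveAltInner N d 2 (by norm_num) hd s hs)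
  | case2 d hd s hlt => exact hs

-- ===== VERDICT (by name: the statement is the Claim_ definition above) =====
theorem solve_spec : Claim_equal_solve := by
  intro N _
  unfold Spec_solve solve solve_alt
  apply List.Perm.sum_eq
  rw [List.perm_ext_iff_of_nodup
    (nodup_solveOuter N 2 (by norm_num) _ (PySem.Set.nodup_ofList _))
    (nodup_solveAltOuter N 3 (by norm_num) _ (PySem.Set.nodup_ofList _))]
  intro x
  rw [mem_solveOuter, mem_solveAltOuter]
  simp only [PySem.Set.mem_ofList, List.mem_singleton]
  constructor
  · rintro (hx | ⟨b, hb, q, hq, hqN, rfl⟩)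
    · exact Or.inl hx
    · exact Or.inr ⟨q, hq, b, hb, hqN, rfl⟩
  · rintro (hx | ⟨d', hd', b, hb, hbN, rfl⟩)
    · exact Or.inl hx
    · exact Or.inr ⟨b, hb, d', hd', hbN, rfl⟩
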